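-- pv_equiv track=rewrite | github.com/jonharrity/euler | src/e51.py | addstars
-- ===== SOURCE A (Python) =====
-- from itertools import combinations
--
-- def addstars(s, x):
--     if len(str(s)) < x:
--         raise Exception('cannot add %s stars to %s' % (str(x), s))
--
--     l = []
--     for arrangement in combinations(range(len(s)), x):
--         news = s
--         for i in arrangement:
--             news = news[:i] + '*' + news[i+1:]
--         l.append(news)
--     return l
-- ===== SOURCE B (Python) =====
-- def addstars(s, x):
--     # Recursive-descent enumeration: at each position either place a star
--     # (if any remain; explored first, matching combinations' lex order)
--     # or keep the original character.
--     n = len(s)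
--     out = []
--
--     def go(i, k, acc):
--         if i == n:
--             if k == 0:
--                 out.append(acc)
--             return
--         if k > 0:
--             go(i + 1, k - 1, acc + '*')
--         go(i + 1, k, acc + s[i])
--
--     go(0, x, '')
--     return out
-- ===== Notes on version B (the rewrite author's own statement) =====
-- stated objective: alternative
-- what changed: B drops itertools.combinations and the per-arrangement slice-splicing loop, enumerating results by a recursive descent over positions that either places a star (when any remain) or keeps the character, building each string left to right.
import Mathlib
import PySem

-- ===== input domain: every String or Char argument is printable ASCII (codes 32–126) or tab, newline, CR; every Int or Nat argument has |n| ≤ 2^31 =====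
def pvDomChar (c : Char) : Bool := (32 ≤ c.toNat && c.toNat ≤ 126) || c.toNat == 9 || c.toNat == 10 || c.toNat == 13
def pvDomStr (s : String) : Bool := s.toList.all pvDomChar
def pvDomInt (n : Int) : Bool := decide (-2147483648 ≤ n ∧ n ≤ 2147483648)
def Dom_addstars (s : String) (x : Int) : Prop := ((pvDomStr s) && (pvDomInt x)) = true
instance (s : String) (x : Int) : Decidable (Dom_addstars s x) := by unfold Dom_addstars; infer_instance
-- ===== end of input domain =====

-- B replaces itertools.combinations + repeated slice-splicing by a direct recursive
-- descent over the string (place a star or keep the character); objective: alternative.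

-- ===== PORT A =====
-- itertools.combinations(l, k) in lexicographic order (exact for a duplicate-free l like range)
def pvCombos (l : List Int) (k : Nat) : List (List Int) :=
  match k, l with
  | 0, _ => [[]]
  | _ + 1, [] => []
  | k + 1, i :: rest => ((pvCombos rest k).map (fun a => i :: a)) ++ pvCombos rest (k + 1)

-- news[:i] + '*' + news[i+1:]
def pvSetStar (news : List Char) (i : Int) : List Char :=
  PySem.List.slice news none (some i) ++ ['*'] ++ PySem.List.slice news (some (i + 1)) none

def addstars (s : String) (x : Int) : List String :=
  if PySem.Str.len s < x then []        -- Python A raises Exception here (outside Pre_)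
  else if x < 0 then []                 -- combinations raises ValueError here (outside Pre_)
  else (pvCombos (PySem.List.pyRange 0 (PySem.Str.len s) 1) x.toNat).map
    (fun arrangement => String.ofList (arrangement.foldl pvSetStar s.toList))

-- ===== PORT B =====
-- go: rest = the characters from position i on, k = stars still to place; star branch first
def pvGo (rest : List Char) (k : Int) (acc : List Char) : List (List Char) :=
  match rest with
  | [] => if k == 0 then [acc] else []
  | c :: rs => (if 0 < k then pvGo rs (k - 1) (acc ++ ['*']) else []) ++ pvGo rs k (acc ++ [c])

def addstars_alt (s : String) (x : Int) : List String :=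
  (pvGo s.toList x []).map String.ofList

-- ===== PRECONDITION & SPEC =====
-- Pre_ excludes exactly the inputs where A raises: x > len(s) (explicit Exception) and x < 0 (ValueError from combinations).
def Pre_addstars (s : String) (x : Int) : Prop := 0 ≤ x ∧ x ≤ (s.toList.length : Int)
instance (s : String) (x : Int) : Decidable (Pre_addstars s x) := by unfold Pre_addstars; infer_instance
def pvWitness_addstars : String × Int := ("abc", 2)

def Spec_addstars (s : String) (x : Int) (out : List String) : Prop := out = addstars_alt s x
instance (s : String) (x : Int) (out : List String) : Decidable (Spec_addstars s x out) := by unfold Spec_addstars; infer_instance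

-- ===== CLAIM (what is proved, stated in full; the proofs are below) =====
def Claim_equal_addstars : Prop := ∀ (s : String) (x : Int), Dom_addstars s x → Pre_addstars s x → Spec_addstars s x (addstars s x)

-- ===== LEMMAS AND PROOFS =====

-- range(n) as a list of Ints
def pvIntRange (n : Nat) : List Int := (List.range n).map Int.ofNat

theorem pvIntRange_succ (n : Nat) :
    pvIntRange (n + 1) = 0 :: (pvIntRange n).map (· + 1) := by
  unfold pvIntRange
  rw [List.range_succ_eq_map, List.map_cons, List.map_map, List.map_map]
  refine congrArg₂ _ (by simp) ?_
  exact List.map_congr_left (fun a _ => by simp [Function.comp])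

theorem pvIntRange_nonneg (n : Nat) : ∀ i ∈ pvIntRange n, 0 ≤ i := by
  intro i hi
  simp only [pvIntRange, List.mem_map] at hi
  obtain ⟨k, _, rfl⟩ := hi
  exact Int.natCast_nonneg k

theorem pvIntRange_lt (n : Nat) : ∀ i ∈ pvIntRange n, i < (n : Int) := by
  intro i hi
  simp only [pvIntRange, List.mem_map, List.mem_range] at hi
  obtain ⟨k, hk, rfl⟩ := hi
  simp only [Int.ofNat_eq_natCast]
  exact_mod_cast hk

theorem pvCombos_map (l : List Int) (f : Int → Int) (k : Nat) :
    pvCombos (l.map f) k = (pvCombos l k).map (List.map f) := by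
  induction l generalizing k with
  | nil => cases k <;> simp [pvCombos]
  | cons i rest ih => cases k with
    | zero => simp [pvCombos]
    | succ k => simp [pvCombos, ih, List.map_map, Function.comp_def]

theorem pvCombos_subset (l : List Int) (k : Nat) :
    ∀ a ∈ pvCombos l k, ∀ i ∈ a, i ∈ l := by
  induction l generalizing k with
  | nil => cases k <;> simp [pvCombos]
  | cons i rest ih => cases k with
    | zero => simp [pvCombos]
    | succ k =>
      intro a ha j hj
      simp only [pvCombos, List.mem_append, List.mem_map] at ha
      rcases ha with ⟨b, hb, rfl⟩ | ha
      · rcases List.mem_cons.mp hj with rfl | hj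
        · simp
        · simp only [List.mem_cons]; exact Or.inr (ih k b hb j hj)
      · simp only [List.mem_cons]; exact Or.inr (ih (k + 1) a ha j hj)

-- membership form of the star application
def pvStars (cs : List Char) (arr : List Int) : List Char :=
  cs.mapIdx (fun j c => if (j : Int) ∈ arr then '*' else c)

theorem length_pvStars (cs : List Char) (arr : List Int) : (pvStars cs arr).length = cs.length := by
  simp [pvStars]

theorem getElem_pvStars (cs : List Char) (arr : List Int) (j : Nat) (h : j < cs.length) :
    (pvStars cs arr)[j]'(by simp [length_pvStars, h]) = if (j : Int) ∈ arr then '*' else cs[j] := by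
  simp [pvStars]

theorem pvStars_nil (cs : List Char) : pvStars cs [] = cs := by
  apply List.ext_getElem
  · simp [length_pvStars]
  · intro j h1 h2
    simp [pvStars]

theorem pvSetStar_eq (cs : List Char) (m : Nat) :
    pvSetStar cs ((m : Nat) : Int) = cs.take m ++ '*' :: cs.drop (m + 1) := by
  have h1 : ((m : Int) + 1) = ((m + 1 : Nat) : Int) := by push_cast; ring
  rw [pvSetStar, h1, PySem.List.slice_to_natCast, PySem.List.slice_from_natCast]
  simp

theorem length_pvSetStar (cs : List Char) (m : Nat) (h : m < cs.length) :
    (pvSetStar cs (m : Int)).length = cs.length := by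
  rw [pvSetStar_eq]; simp; omega

theorem getElem_pvSetStar (cs : List Char) (m : Nat) (h : m < cs.length) (j : Nat) (hj : j < cs.length) :
    (pvSetStar cs (m : Int))[j]'(by rw [length_pvSetStar cs m h]; exact hj) =
      if j = m then '*' else cs[j] := by
  rw [List.getElem_of_eq (pvSetStar_eq cs m)]
  rw [List.getElem_append]
  simp only [List.length_take, Nat.min_eq_left h.le]
  rcases lt_trichotomy j m with hlt | rfl | hgt
  · rw [dif_pos hlt, if_neg (by omega), List.getElem_take]
  · rw [dif_neg (by omega), if_pos rfl]
    simp
  · rw [dif_neg (by omega), if_neg (by omega), List.getElem_cons, dif_neg (by omega), List.getElem_drop]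
    exact getElem_congr_idx (by omega)

theorem pvFoldl_setStar (arr : List Int) (cs : List Char)
    (hb : ∀ i ∈ arr, 0 ≤ i ∧ i < (cs.length : Int)) :
    arr.foldl pvSetStar cs = pvStars cs arr := by
  induction arr generalizing cs with
  | nil => simp [List.foldl_nil, pvStars_nil]
  | cons a arr ih =>
    obtain ⟨ha0, ha1⟩ := hb a (by simp)
    obtain ⟨m, rfl⟩ := Int.eq_ofNat_of_zero_le ha0
    have hm : m < cs.length := by exact_mod_cast ha1
    rw [List.foldl_cons,
      ih (pvSetStar cs m) (by
        intro i hi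
        have := hb i (List.mem_cons_of_mem _ hi)
        rwa [length_pvSetStar cs m hm])]
    apply List.ext_getElem
    · simp [length_pvStars, length_pvSetStar cs m hm]
    · intro j h1 h2
      have hjlen : j < cs.length := by
        simpa [length_pvStars, length_pvSetStar cs m hm] using h1
      rw [getElem_pvStars _ arr j (by rw [length_pvSetStar cs m hm]; exact hjlen),
        getElem_pvStars cs _ j hjlen,
        getElem_pvSetStar cs m hm j hjlen]
      by_cases hmem : (j : Int) ∈ arr <;> by_cases hjm : j = m <;>
        simp [hmem, hjm, List.mem_cons]

theorem pvStars_cons_star (c : Char) (rs : List Char) (arr : List Int) :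
    pvStars (c :: rs) (0 :: arr.map (· + 1)) = '*' :: pvStars rs arr := by
  apply List.ext_getElem
  · simp [length_pvStars]
  · intro j h1 h2
    cases j with
    | zero => simp [pvStars]
    | succ j =>
      have hj : j < rs.length := by
        simpa [length_pvStars] using h2
      rw [List.getElem_cons_succ, getElem_pvStars rs arr j hj,
        getElem_pvStars (c :: rs) _ (j + 1) (by simpa using Nat.succ_lt_succ hj),
        List.getElem_cons_succ]
      by_cases hmem : (j : Int) ∈ arr
      · push_cast; simp [hmem]
      · push_cast
        simp only [List.mem_cons, List.mem_map, add_left_inj, exists_eq_right, hmem]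
        simp only [or_false, if_false]
        rw [if_neg (by omega)]

theorem pvStars_cons_keep (c : Char) (rs : List Char) (arr : List Int)
    (h0 : ∀ i ∈ arr, 0 ≤ i) :
    pvStars (c :: rs) (arr.map (· + 1)) = c :: pvStars rs arr := by
  apply List.ext_getElem
  · simp [length_pvStars]
  · intro j h1 h2
    cases j with
    | zero =>
      rw [getElem_pvStars (c :: rs) _ 0 (by simp), List.getElem_cons_zero, List.getElem_cons_zero]
      rw [if_neg]
      simp only [List.mem_map]
      rintro ⟨a, ha, h⟩
      have := h0 a ha
      omega
    | succ j =>
      have hj : j < rs.length := by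
        simpa [length_pvStars] using h2
      rw [List.getElem_cons_succ, getElem_pvStars rs arr j hj,
        getElem_pvStars (c :: rs) _ (j + 1) (by simpa using Nat.succ_lt_succ hj),
        List.getElem_cons_succ]
      by_cases hmem : (j : Int) ∈ arr <;> (push_cast; simp [hmem])

theorem pvGo_eq (cs : List Char) (m : Nat) (acc : List Char) :
    pvGo cs (m : Int) acc
      = (pvCombos (pvIntRange cs.length) m).map (fun arr => acc ++ pvStars cs arr) := by
  induction cs generalizing m acc with
  | nil =>
    cases m with
    | zero => simp [pvGo, pvIntRange, pvCombos, pvStars_nil]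
    | succ m =>
      simp only [pvGo, pvIntRange, beq_iff_eq]
      rw [if_neg (by push_cast; omega)]
      simp [pvCombos]
  | cons c rs ih =>
    have hlen : (c :: rs).length = rs.length + 1 := rfl
    rw [hlen, pvIntRange_succ]
    cases m with
    | zero =>
      simp only [pvCombos, List.map_cons, List.map_nil, Nat.cast_zero, pvGo]
      rw [if_neg (by omega)]
      have h0 : ((0 : Nat) : Int) = (0 : Int) := rfl
      rw [List.nil_append, show (0 : Int) = ((0 : Nat) : Int) from rfl, ih 0 (acc ++ [c])]
      simp [pvCombos, pvStars_nil]
    | succ m =>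
      show (if 0 < ((m + 1 : Nat) : Int) then pvGo rs (((m + 1 : Nat) : Int) - 1) (acc ++ ['*']) else [])
          ++ pvGo rs ((m + 1 : Nat) : Int) (acc ++ [c]) = _
      rw [if_pos (by positivity)]
      have hsub : ((m + 1 : Nat) : Int) - 1 = (m : Int) := by push_cast; ring
      rw [hsub, ih m (acc ++ ['*']), ih (m + 1) (acc ++ [c])]
      show _ = (pvCombos (0 :: (pvIntRange rs.length).map (· + 1)) (m + 1)).map _
      rw [show pvCombos (0 :: (pvIntRange rs.length).map (· + 1)) (m + 1)
            = ((pvCombos ((pvIntRange rs.length).map (· + 1)) m).map (fun a => 0 :: a))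
              ++ pvCombos ((pvIntRange rs.length).map (· + 1)) (m + 1) from rfl]
      rw [pvCombos_map, pvCombos_map, List.map_append, List.map_map, List.map_map, List.map_map]
      refine congrArg₂ _ ?_ ?_
      · refine List.map_congr_left (fun arr harr => ?_)
        simp only [Function.comp_apply]
        rw [pvStars_cons_star]
        simp
      · refine List.map_congr_left (fun arr harr => ?_)
        simp only [Function.comp_apply]
        rw [pvStars_cons_keep c rs arr
          (fun i hi => pvIntRange_nonneg rs.length i (pvCombos_subset _ _ arr harr i hi))]
        simp

-- ===== VERDICT (by name: the statement is the Claim_ definition above) =====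
theorem addstars_spec : Claim_equal_addstars := by
  intro s x _ hpre
  obtain ⟨hx0, hxlen⟩ := hpre
  obtain ⟨m, rfl⟩ := Int.eq_ofNat_of_zero_le hx0
  unfold Spec_addstars addstars addstars_alt
  have hsl : PySem.Str.len s = (s.toList.length : Int) := by simp [PySem.Str.len_eq]
  rw [if_neg (by rw [hsl]; omega), if_neg (by omega)]
  have hrange : PySem.List.pyRange 0 (PySem.Str.len s) 1 = pvIntRange s.toList.length := by
    rw [hsl, PySem.List.pyRange_one]
    simp [pvIntRange, Int.ofNat_eq_natCast]
  rw [hrange, Int.toNat_natCast, pvGo_eq]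
  rw [List.map_map]
  refine List.map_congr_left (fun arr harr => ?_)
  simp only [Function.comp_apply, List.nil_append]
  rw [pvFoldl_setStar arr s.toList (fun i hi => ⟨
    pvIntRange_nonneg _ i (pvCombos_subset _ _ arr harr i hi),
    pvIntRange_lt _ i (pvCombos_subset _ _ arr harr i hi)⟩)]
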